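-- pv_equiv track=rewrite | github.com/sashaperigo/gedcom-tools | serve_viz.py | _add_famc_to_indi
-- ===== SOURCE A (Python) =====
-- def _find_record_block(lines: list[str], xref: str, record_tag: str, label: str) -> tuple[int | None, int | None, str | None]:
--     start = next((i for i, ln in enumerate(lines) if ln.strip() == f'0 {xref} {record_tag}'), None)
--     if start is None:
--         return None, None, f'{label} {xref} not found'
--     end = next((i for i in range(start + 1, len(lines)) if lines[i].startswith('0 ')), len(lines))
--     return start, end, None
--
-- def _find_indi_block(lines: list[str], xref: str) -> tuple[int | None, int | None, str | None]:
--     return _find_record_block(lines, xref, 'INDI', 'Individual')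
--
-- def _add_famc_to_indi(lines: list[str], indi_xref: str, fam_xref: str) -> list[str]:
--     """Insert '1 FAMC fam_xref' at the end of indi_xref's INDI block (idempotent)."""
--     indi_start, indi_end, err = _find_indi_block(lines, indi_xref)
--     if err:
--         return lines
--     target = f'1 FAMC {fam_xref}'
--     for i in range(indi_start + 1, indi_end):
--         if lines[i].strip() == target:
--             return lines
--     return lines[:indi_end] + [target] + lines[indi_end:]
-- ===== SOURCE B (Python) =====
-- def _add_famc_to_indi(lines: list[str], indi_xref: str, fam_xref: str) -> list[str]:
--     """Single pass: state machine over lines; insert '1 FAMC fam_xref' before the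
--     line that ends the first indi_xref INDI block (or at EOF), unless already there."""
--     header = f'0 {indi_xref} INDI'
--     target = f'1 FAMC {fam_xref}'
--     out = []
--     state = 0  # 0: before the INDI block, 1: inside it, 2: after it / done
--     for ln in lines:
--         if state == 0:
--             out.append(ln)
--             if ln.strip() == header:
--                 state = 1
--         elif state == 1:
--             if ln.startswith('0 '):
--                 out.append(target)
--                 out.append(ln)
--                 state = 2
--             elif ln.strip() == target:
--                 out.append(ln)
--                 state = 2
--             else:
--                 out.append(ln)
--         else:
--             out.append(ln)
--     if state == 0:
--         return lines
--     if state == 1: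
--         out.append(target)
--     return out
-- ===== Notes on version B (the rewrite author's own statement) =====
-- stated objective: alternative
-- what changed: A locates the INDI block with three separate index scans (find block start, find block end, scan the block for an existing FAMC line) and then rebuilds the list by slicing and concatenation; B is a single left-to-right state-machine pass (before-block / in-block / done) that builds the output list once, inserting the FAMC line where the block ends.
import Mathlib
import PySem

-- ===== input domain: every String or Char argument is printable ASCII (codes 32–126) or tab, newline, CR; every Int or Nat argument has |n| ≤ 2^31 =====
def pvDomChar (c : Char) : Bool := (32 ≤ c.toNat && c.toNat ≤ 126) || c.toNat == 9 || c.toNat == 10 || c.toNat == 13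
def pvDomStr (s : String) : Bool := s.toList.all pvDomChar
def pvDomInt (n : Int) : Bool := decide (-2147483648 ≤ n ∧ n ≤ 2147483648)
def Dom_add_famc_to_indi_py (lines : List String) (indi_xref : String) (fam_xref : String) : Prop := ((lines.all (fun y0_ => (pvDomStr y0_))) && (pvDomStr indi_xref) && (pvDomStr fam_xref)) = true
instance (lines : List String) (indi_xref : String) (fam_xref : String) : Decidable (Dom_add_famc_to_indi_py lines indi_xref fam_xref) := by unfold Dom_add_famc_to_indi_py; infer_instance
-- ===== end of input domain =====

-- B replaces A's three index scans (find block start, find block end, scan block for a duplicate)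
-- plus a slice-splice by one single left-to-right state-machine pass building the output list ('alternative').

-- ===== PORT A =====
-- next((i for i, ln in enumerate(lines) if ln.strip() == s0), None)
def pvFindStart (s0 : String) : List String → Option Nat
  | [] => none
  | ln :: ls => if PySem.Str.strip ln == s0 then some 0 else (pvFindStart s0 ls).map (· + 1)

-- next((i for i in range(i0, len(lines)) if lines[i].startswith('0 ')), len(lines));
-- n counts the indices remaining in the range (structural recursion over the range), the index stays in range
def pvFindEndLoop (lines : List String) : Nat → Nat → Nat
  | _, 0 => lines.length
  | i, n + 1 =>
    if PySem.Str.startswith (lines.getD i "") "0 " then i else pvFindEndLoop lines (i + 1) n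

def pvFindEnd (lines : List String) (i : Nat) : Nat :=
  pvFindEndLoop lines i (lines.length - i)

-- for i in range(i, e): if lines[i].strip() == target: return True;
-- n counts the indices remaining in the range, which all lie below e ≤ len
def pvHasTargetLoop (lines : List String) (target : String) : Nat → Nat → Bool
  | _, 0 => false
  | i, n + 1 =>
    if PySem.Str.strip (lines.getD i "") == target then true
    else pvHasTargetLoop lines target (i + 1) n

def pvHasTarget (lines : List String) (target : String) (i e : Nat) : Bool :=
  pvHasTargetLoop lines target i (e - i)

def add_famc_to_indi_py (lines : List String) (indi_xref : String) (fam_xref : String) : List String :=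
  match pvFindStart ("0 " ++ indi_xref ++ " INDI") lines with
  | none => lines
  | some indi_start =>
    let indi_end := pvFindEnd lines (indi_start + 1)
    let target := "1 FAMC " ++ fam_xref
    if pvHasTarget lines target (indi_start + 1) indi_end then lines
    else
      -- lines[:indi_end] + [target] + lines[indi_end:]; indi_end : Nat, so the slices are take/drop
      -- (PySem.List.slice_to_natCast / slice_from_natCast)
      lines.take indi_end ++ [target] ++ lines.drop indi_end

-- ===== PORT B =====
-- one step of Source B's loop; state 0: before the INDI block, 1: inside it, 2: after it / done
def pvAltStep (header target : String) : List String × Nat → String → List String × Nat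
  | (out, state), ln =>
    if state = 0 then
      (out ++ [ln], if PySem.Str.strip ln == header then 1 else 0)
    else if state = 1 then
      if PySem.Str.startswith ln "0 " then (out ++ [target, ln], 2)
      else if PySem.Str.strip ln == target then (out ++ [ln], 2)
      else (out ++ [ln], 1)
    else (out ++ [ln], 2)

def add_famc_to_indi_py_alt (lines : List String) (indi_xref : String) (fam_xref : String) : List String :=
  let header := "0 " ++ indi_xref ++ " INDI"
  let target := "1 FAMC " ++ fam_xref
  let r := lines.foldl (pvAltStep header target) ([], 0)
  if r.2 = 0 then lines
  else if r.2 = 1 then r.1 ++ [target]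
  else r.1

-- ===== PRECONDITION & SPEC =====
def Spec_add_famc_to_indi_py (lines : List String) (indi_xref : String) (fam_xref : String) (out : List String) : Prop := out = add_famc_to_indi_py_alt lines indi_xref fam_xref
instance (lines : List String) (indi_xref : String) (fam_xref : String) (out : List String) : Decidable (Spec_add_famc_to_indi_py lines indi_xref fam_xref out) := by unfold Spec_add_famc_to_indi_py; infer_instance

-- ===== CLAIM (what is proved, stated in full; the proofs are below) =====
def Claim_equal_add_famc_to_indi_py : Prop := ∀ (lines : List String) (indi_xref : String) (fam_xref : String), Dom_add_famc_to_indi_py lines indi_xref fam_xref → Spec_add_famc_to_indi_py lines indi_xref fam_xref (add_famc_to_indi_py lines indi_xref fam_xref)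

-- ===== LEMMAS AND PROOFS =====

-- relative position (within the tail after the header line) of the block's end
def pvEAux : List String → Nat
  | [] => 0
  | ln :: ls => if PySem.Str.startswith ln "0 " then 0 else pvEAux ls + 1

-- what B's in-block phase produces from the tail after the header line
def pvRewB (target : String) : List String → List String
  | [] => [target]
  | ln :: ts =>
    if PySem.Str.startswith ln "0 " then target :: ln :: ts
    else if PySem.Str.strip ln == target then ln :: ts
    else ln :: pvRewB target ts

-- the three state cases of one step of B's loop
theorem pvAltStep_0 (header target : String) (out : List String) (ln : String) :
    pvAltStep header target (out, 0) ln =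
      (out ++ [ln], if PySem.Str.strip ln == header then 1 else 0) := by
  simp [pvAltStep]

theorem pvAltStep_1 (header target : String) (out : List String) (ln : String) :
    pvAltStep header target (out, 1) ln =
      if PySem.Str.startswith ln "0 " then (out ++ [target, ln], 2)
      else if PySem.Str.strip ln == target then (out ++ [ln], 2)
      else (out ++ [ln], 1) := by
  simp [pvAltStep]

theorem pvAltStep_2 (header target : String) (out : List String) (ln : String) :
    pvAltStep header target (out, 2) ln = (out ++ [ln], 2) := by
  simp [pvAltStep]

theorem pvFindStart_lt {s0 : String} : ∀ {lines : List String} {k : Nat},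
    pvFindStart s0 lines = some k → k < lines.length := by
  intro lines
  induction lines with
  | nil => intro k h; simp [pvFindStart] at h
  | cons ln ls ih =>
    intro k h
    simp only [pvFindStart] at h
    by_cases hc : (PySem.Str.strip ln == s0) = true
    · rw [if_pos hc] at h
      injection h with h
      simp only [List.length_cons]
      omega
    · rw [if_neg hc] at h
      cases hfs : pvFindStart s0 ls with
      | none => rw [hfs] at h; simp at h
      | some k' =>
        rw [hfs] at h
        simp only [Option.map_some, Option.some.injEq] at h
        have := ih hfs
        simp only [List.length_cons]
        omega

theorem pvEAux_le : ∀ (t : List String), pvEAux t ≤ t.length := by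
  intro t
  induction t with
  | nil => simp [pvEAux]
  | cons ln ts ih =>
    rw [pvEAux]
    by_cases h : (PySem.Str.startswith ln "0 ") = true
    · rw [if_pos h]; simp
    · rw [if_neg h]; simp only [List.length_cons]; omega

theorem pvFindEnd_eq (lines : List String) : ∀ (n i : Nat), lines.length - i = n → i ≤ lines.length →
    pvFindEndLoop lines i n = i + pvEAux (lines.drop i) := by
  intro n
  induction n with
  | zero =>
    intro i h hle
    have hi : i = lines.length := by omega
    subst hi
    rw [pvFindEndLoop]
    simp [List.drop_length, pvEAux]
  | succ n ih =>
    intro i h hle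
    have hi : i < lines.length := by omega
    rw [pvFindEndLoop, List.getD_eq_getElem lines "" hi, List.drop_eq_getElem_cons hi, pvEAux]
    by_cases hs : (PySem.Str.startswith lines[i] "0 ") = true
    · rw [if_pos hs, if_pos hs]
      omega
    · rw [if_neg hs, if_neg hs, ih (i + 1) (by omega) (by omega)]
      omega

theorem pvHasTarget_eq (lines : List String) (target : String) :
    ∀ (m i : Nat), i + m ≤ lines.length →
    pvHasTargetLoop lines target i m =
      ((lines.drop i).take m).any (fun l => PySem.Str.strip l == target) := by
  intro m
  induction m with
  | zero =>
    intro i h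
    rw [pvHasTargetLoop]
    simp
  | succ m ih =>
    intro i h
    have hi : i < lines.length := by omega
    rw [pvHasTargetLoop, List.getD_eq_getElem lines "" hi,
      List.drop_eq_getElem_cons hi, List.take_succ_cons, List.any_cons]
    by_cases hc : (PySem.Str.strip lines[i] == target) = true
    · rw [if_pos hc, hc, Bool.true_or]
    · rw [Bool.not_eq_true] at hc
      rw [if_neg (by simp [hc]), hc, Bool.false_or]
      rw [ih (i + 1) (by omega)]

-- A's relative tail rewrite equals B's in-block rewrite
theorem pvTail_eq (target : String) : ∀ (t : List String),
    (if (t.take (pvEAux t)).any (fun l => PySem.Str.strip l == target) then t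
     else t.take (pvEAux t) ++ [target] ++ t.drop (pvEAux t)) = pvRewB target t := by
  intro t
  induction t with
  | nil => simp [pvEAux, pvRewB]
  | cons ln ts ih =>
    rw [pvEAux, pvRewB]
    by_cases hs : (PySem.Str.startswith ln "0 ") = true
    · rw [if_pos hs, if_pos hs]
      simp
    · rw [if_neg hs, if_neg hs, List.take_succ_cons, List.drop_succ_cons,
        List.any_cons]
      by_cases hc : (PySem.Str.strip ln == target) = true
      · rw [if_pos hc, hc, Bool.true_or, if_pos rfl]
      · rw [Bool.not_eq_true] at hc
        rw [hc, Bool.false_or, if_neg (by simp : ¬ (false = true))]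
        by_cases ha : ((ts.take (pvEAux ts)).any (fun l => PySem.Str.strip l == target)) = true
        · rw [if_pos ha]
          rw [if_pos ha] at ih
          rw [← ih]
        · rw [if_neg ha]
          rw [if_neg ha] at ih
          rw [← ih]
          simp
-- B's fold, once in state 2, just copies the rest
theorem pvFold2 (header target : String) : ∀ (t : List String) (out : List String),
    t.foldl (pvAltStep header target) (out, 2) = (out ++ t, 2) := by
  intro t
  induction t with
  | nil => simp
  | cons ln ts ih =>
    intro out
    rw [List.foldl_cons, pvAltStep_2, ih]
    simp

-- B's fold from state 1: the final post-processing yields out ++ pvRewB target t, and state 0 is unreachable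
theorem pvFold1 (header target : String) : ∀ (t : List String) (out : List String),
    (if (t.foldl (pvAltStep header target) (out, 1)).2 = 1 then
        (t.foldl (pvAltStep header target) (out, 1)).1 ++ [target]
     else (t.foldl (pvAltStep header target) (out, 1)).1) = out ++ pvRewB target t ∧
    (t.foldl (pvAltStep header target) (out, 1)).2 ≠ 0 := by
  intro t
  induction t with
  | nil => intro out; simp [pvRewB]
  | cons ln ts ih =>
    intro out
    rw [List.foldl_cons, pvAltStep_1, pvRewB]
    by_cases hs : (PySem.Str.startswith ln "0 ") = true
    · rw [if_pos hs, if_pos hs, pvFold2]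
      exact ⟨by simp, by simp⟩
    · rw [if_neg hs, if_neg hs]
      by_cases hc : (PySem.Str.strip ln == target) = true
      · rw [if_pos hc, if_pos hc, pvFold2]
        exact ⟨by simp, by simp⟩
      · rw [if_neg hc, if_neg hc]
        obtain ⟨ih1, ih2⟩ := ih (out ++ [ln])
        refine ⟨?_, ih2⟩
        rw [ih1]
        simp

-- B's fold from state 0 when the header never occurs
theorem pvFold0_none (header target : String) : ∀ (t : List String),
    pvFindStart header t = none → ∀ (out : List String),
    t.foldl (pvAltStep header target) (out, 0) = (out ++ t, 0) := by
  intro t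
  induction t with
  | nil => intro _ out; simp
  | cons ln ts ih =>
    intro h out
    simp only [pvFindStart] at h
    by_cases hc : (PySem.Str.strip ln == header) = true
    · rw [if_pos hc] at h; simp at h
    · rw [if_neg hc] at h
      cases hfs : pvFindStart header ts with
      | some k => rw [hfs] at h; simp at h
      | none =>
        rw [List.foldl_cons, pvAltStep_0, if_neg hc, ih hfs (out ++ [ln])]
        simp

-- B's fold from state 0 when the header first occurs at index k
theorem pvFold0_some (header target : String) : ∀ (t : List String) (k : Nat),
    pvFindStart header t = some k → ∀ (out : List String),
    t.foldl (pvAltStep header target) (out, 0) =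
      (t.drop (k + 1)).foldl (pvAltStep header target) (out ++ t.take (k + 1), 1) := by
  intro t
  induction t with
  | nil => intro k h; simp [pvFindStart] at h
  | cons ln ts ih =>
    intro k h out
    simp only [pvFindStart] at h
    by_cases hc : (PySem.Str.strip ln == header) = true
    · rw [if_pos hc] at h
      injection h with h
      subst h
      rw [List.foldl_cons, pvAltStep_0, if_pos hc]
      simp
    · rw [if_neg hc] at h
      cases hfs : pvFindStart header ts with
      | none => rw [hfs] at h; simp at h
      | some k' =>
        rw [hfs] at h
        simp only [Option.map_some, Option.some.injEq] at h
        subst h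
        rw [List.foldl_cons, pvAltStep_0, if_neg hc, ih k' hfs (out ++ [ln]),
          List.drop_succ_cons, List.take_succ_cons]
        simp

-- ===== VERDICT (by name: the statement is the Claim_ definition above) =====
theorem add_famc_to_indi_py_spec : Claim_equal_add_famc_to_indi_py := by
  intro lines indi_xref fam_xref _dom
  unfold Spec_add_famc_to_indi_py
  simp only [add_famc_to_indi_py, add_famc_to_indi_py_alt]
  cases hfs : pvFindStart ("0 " ++ indi_xref ++ " INDI") lines with
  | none =>
    have hB := pvFold0_none ("0 " ++ indi_xref ++ " INDI") ("1 FAMC " ++ fam_xref) lines hfs []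
    simp only [hB]
    simp
  | some k =>
    have hk : k < lines.length := pvFindStart_lt hfs
    have hB := pvFold0_some ("0 " ++ indi_xref ++ " INDI") ("1 FAMC " ++ fam_xref) lines k hfs []
    simp only [List.nil_append] at hB
    set t := lines.drop (k + 1) with ht
    have hEle : pvEAux t ≤ t.length := pvEAux_le t
    have htlen : t.length = lines.length - (k + 1) := by rw [ht, List.length_drop]
    have hE : pvFindEnd lines (k + 1) = (k + 1) + pvEAux t := by
      rw [pvFindEnd]
      rw [pvFindEnd_eq lines (lines.length - (k + 1)) (k + 1) rfl (by omega), ht]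
    have hH : pvHasTarget lines ("1 FAMC " ++ fam_xref) (k + 1) ((k + 1) + pvEAux t) =
        (t.take (pvEAux t)).any (fun l => PySem.Str.strip l == ("1 FAMC " ++ fam_xref)) := by
      rw [pvHasTarget]
      have hm : (k + 1) + pvEAux t - (k + 1) = pvEAux t := by omega
      rw [hm, pvHasTarget_eq lines ("1 FAMC " ++ fam_xref) (pvEAux t) (k + 1) (by omega), ht]
    have h1 := pvFold1 ("0 " ++ indi_xref ++ " INDI") ("1 FAMC " ++ fam_xref) t (lines.take (k + 1))
    have htail := pvTail_eq ("1 FAMC " ++ fam_xref) t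
    simp only [hB, hE, hH]
    rw [if_neg h1.2, h1.1]
    by_cases ha : ((t.take (pvEAux t)).any (fun l => PySem.Str.strip l == ("1 FAMC " ++ fam_xref))) = true
    · rw [if_pos ha]
      rw [if_pos ha] at htail
      conv_rhs => rw [← htail]
      rw [ht, List.take_append_drop]
    · rw [if_neg ha]
      rw [if_neg ha] at htail
      rw [← htail, List.take_add, ← ht]
      have hdd : lines.drop ((k + 1) + pvEAux t) = t.drop (pvEAux t) := by
        rw [ht, List.drop_drop, Nat.add_comm]
      rw [hdd]
      simp
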